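-- pv_equiv track=rewrite | github.com/LxFee/PYPrograms | otherAnimateTidy.py | prework
-- ===== SOURCE A (Python) =====
-- def prework(s : str):
--     t = []
--     ignore = False
--     for ch in s:
--         if ch == '[':
--             ignore = True
--         if ch == ']':
--             ignore = False
--         if ignore:
--             continue
--         t.append(ch)
--     return str(t)
-- ===== SOURCE B (Python) =====
-- def prework(s : str):
--     out = []
--     i = 0
--     n = len(s)
--     while i < n:
--         ch = s[i]
--         i += 1
--         if ch == '[':
--             while i < n and s[i] != ']':
--                 i += 1
--         else:
--             out.append(ch)
--     return str(out)
-- ===== Notes on version B (the rewrite author's own statement) =====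
-- stated objective: alternative
-- what changed: B drops the per-character ignore flag: an index walk that, at each opening bracket, skips the whole run up to the next closing bracket in an inner loop, then formats the kept characters with str(out) as A does.
import Mathlib
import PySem

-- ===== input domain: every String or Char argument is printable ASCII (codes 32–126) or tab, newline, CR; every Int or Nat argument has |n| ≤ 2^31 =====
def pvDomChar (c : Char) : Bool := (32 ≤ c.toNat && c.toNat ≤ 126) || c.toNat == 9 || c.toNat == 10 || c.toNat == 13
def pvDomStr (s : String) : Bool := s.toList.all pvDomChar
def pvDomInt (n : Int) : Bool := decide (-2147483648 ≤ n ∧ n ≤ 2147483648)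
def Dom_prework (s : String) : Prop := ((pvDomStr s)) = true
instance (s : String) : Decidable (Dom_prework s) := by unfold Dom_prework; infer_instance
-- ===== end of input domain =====

-- B replaces A's per-character ignore-flag scan by index jumps that skip each bracketed run in an
-- inner loop (alternative decomposition, same return value).

-- shared helper: Python's str(...) applied to a list of one-character strings (repr of each
-- char on the ASCII/tab/newline/CR domain, joined with ', ' inside '[' ']')
def pyReprChar (c : Char) : List Char :=
  if c = '\t' then ['\'', '\\', 't', '\'']
  else if c = '\n' then ['\'', '\\', 'n', '\'']
  else if c = '\r' then ['\'', '\\', 'r', '\'']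
  else if c = '\'' then ['"', '\'', '"']
  else if c = '\\' then ['\'', '\\', '\\', '\'']
  else ['\'', c, '\'']

def pyReprCharList (l : List Char) : String :=
  match l with
  | [] => "[]"
  | x :: xs =>
    String.mk ('[' :: (pyReprChar x ++ xs.flatMap (fun c => ',' :: ' ' :: pyReprChar c) ++ [']']))

-- ===== PORT A =====
-- A's loop body: state is (t, ignore)
def preworkStep (st : List Char × Bool) (ch : Char) : List Char × Bool :=
  let ig1 := if ch = '[' then true else st.2
  let ig2 := if ch = ']' then false else ig1
  if ig2 then (st.1, ig2) else (st.1 ++ [ch], ig2)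

def prework (s : String) : String :=
  pyReprCharList (s.toList.foldl preworkStep ([], false)).1

-- ===== PORT B =====
-- B's outer index loop as structural recursion; B's inner skip-while is the dropWhile
def preworkStrip : List Char → List Char
  | [] => []
  | c :: rest =>
    if c = '[' then preworkStrip (rest.dropWhile (fun x => x ≠ ']'))
    else c :: preworkStrip rest
termination_by l => l.length
decreasing_by
  · exact Nat.lt_succ_of_le (List.length_dropWhile_le _ _)
  · simp

def prework_alt (s : String) : String :=
  pyReprCharList (preworkStrip s.toList)

-- ===== PRECONDITION & SPEC =====
def Spec_prework (s : String) (out : String) : Prop := out = prework_alt s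
instance (s : String) (out : String) : Decidable (Spec_prework s out) := by unfold Spec_prework; infer_instance

-- ===== CLAIM (what is proved, stated in full; the proofs are below) =====
def Claim_equal_prework : Prop := ∀ (s : String), Dom_prework s → Spec_prework s (prework s)

-- ===== LEMMAS AND PROOFS =====

-- A's flag loop equals B's run-skipping recursion, for both values of the flag
lemma prework_loop_eq (l : List Char) :
    (∀ t, (l.foldl preworkStep (t, false)).1 = t ++ preworkStrip l) ∧
    (∀ t, (l.foldl preworkStep (t, true)).1
        = t ++ preworkStrip (l.dropWhile (fun x => x ≠ ']'))) := by
  induction l with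
  | nil => simp [preworkStrip]
  | cons c rest ih =>
    constructor
    · intro t
      by_cases hbr : c = '['
      · subst hbr
        simpa [preworkStep, preworkStrip] using ih.2 t
      · by_cases hcl : c = ']'
        · subst hcl
          simpa [preworkStep, preworkStrip] using ih.1 (t ++ [']'])
        · simpa [preworkStep, preworkStrip, hbr, hcl] using ih.1 (t ++ [c])
    · intro t
      by_cases hcl : c = ']'
      · subst hcl
        simpa [preworkStep, preworkStrip] using ih.1 (t ++ [']'])
      · by_cases hbr : c = '['
        · subst hbr
          simpa [preworkStep, hcl] using ih.2 t
        · simpa [preworkStep, hbr, hcl] using ih.2 t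

-- ===== VERDICT (by name: the statement is the Claim_ definition above) =====
theorem prework_spec : Claim_equal_prework := by
  intro s _
  unfold Spec_prework prework prework_alt
  rw [(prework_loop_eq s.toList).1 []]
  simp
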